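-- pv_equiv track=rewrite | github.com/je-clark/strang | strang_helpers.py | encode_strang
-- ===== SOURCE A (Python) =====
-- def encode_strang(bitwise_strang, spreading_code):
--
--     encoding = [0,]*(len(spreading_code[0])*8)
--     for character, code in zip(bitwise_strang, spreading_code):
--         encoded_char = ()
--         for bit in character:
--             adjusted_char = 2*bit - 1
--             encoded_bit = tuple(map(lambda code_element : adjusted_char*code_element, code))
--             encoded_char = encoded_char + encoded_bit
--         for i in range(0,len(encoding)):
--             encoding[i] = encoding[i] + encoded_char[i]
--
--     return tuple(encoding)
-- ===== SOURCE B (Python) =====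
-- def encode_strang(bitwise_strang, spreading_code):
--     L = len(spreading_code[0])
--     pairs = list(zip(bitwise_strang, spreading_code))
--     return tuple(
--         sum((2 * ch[i // len(code)] - 1) * code[i % len(code)] for ch, code in pairs)
--         for i in range(8 * L)
--     )
-- ===== Notes on version B (the rewrite author's own statement) =====
-- stated objective: alternative
-- what changed: B computes each output position directly by a closed-form index formula (2*ch[i//len(code)]-1)*code[i%len(code)] summed over the zipped pairs, output-major, instead of A's character-major pass that concatenates a per-character encoded tuple and accumulates it into a mutable encoding list.
import Mathlib
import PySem

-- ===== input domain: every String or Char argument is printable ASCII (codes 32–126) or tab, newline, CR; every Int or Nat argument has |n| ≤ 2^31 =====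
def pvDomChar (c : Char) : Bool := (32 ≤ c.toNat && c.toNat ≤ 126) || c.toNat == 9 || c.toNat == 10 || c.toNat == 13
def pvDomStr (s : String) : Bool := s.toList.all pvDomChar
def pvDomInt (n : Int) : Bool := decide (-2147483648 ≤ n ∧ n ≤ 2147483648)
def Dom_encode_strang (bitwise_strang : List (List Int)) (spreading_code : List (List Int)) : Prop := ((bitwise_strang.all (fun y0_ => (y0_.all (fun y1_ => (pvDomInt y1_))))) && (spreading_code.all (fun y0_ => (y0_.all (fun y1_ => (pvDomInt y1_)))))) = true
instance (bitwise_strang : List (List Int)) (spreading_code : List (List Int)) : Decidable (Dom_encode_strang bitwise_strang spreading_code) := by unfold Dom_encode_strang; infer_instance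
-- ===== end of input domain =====

-- B recomputes each output position by index arithmetic over the zipped pairs instead of
-- A's character-major accumulation; equal cost, different decomposition (objective: alternative).

-- ===== PORT A =====
-- Python A raises IndexError on empty spreading_code and when an encoded_char is shorter than
-- encoding; those inputs are excluded by Pre_encode_strang below (the port uses getD/headD there).
def encode_strang (bitwise_strang : List (List Int)) (spreading_code : List (List Int)) : List Int :=
  let encoding0 : List Int := List.replicate ((spreading_code.headD []).length * 8) 0
  (List.zip bitwise_strang spreading_code).foldl
    (fun encoding p =>
      let encoded_char : List Int :=
        p.1.foldl (fun acc bit =>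
          let adjusted_char := 2 * bit - 1
          acc ++ p.2.map (fun code_element => adjusted_char * code_element)) []
      (List.range encoding.length).map (fun i => encoding.getD i 0 + encoded_char.getD i 0))
    encoding0

-- ===== PORT B =====
def encode_strang_alt (bitwise_strang : List (List Int)) (spreading_code : List (List Int)) : List Int :=
  let L := (spreading_code.headD []).length
  let pairs := List.zip bitwise_strang spreading_code
  (List.range (8 * L)).map (fun i =>
    pairs.foldl (fun s p =>
      s + (2 * p.1.getD (i / p.2.length) 0 - 1) * p.2.getD (i % p.2.length) 0) 0)

-- ===== PRECONDITION & SPEC =====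
-- Pre_ excludes exactly the inputs where Python A raises IndexError: empty spreading_code,
-- and zipped pairs whose character*code bit supply is shorter than the 8*L encoding.
def Pre_encode_strang (bitwise_strang : List (List Int)) (spreading_code : List (List Int)) : Prop :=
  spreading_code ≠ [] ∧
  ∀ p ∈ List.zip bitwise_strang spreading_code,
    8 * (spreading_code.headD []).length ≤ p.1.length * p.2.length
instance (bitwise_strang : List (List Int)) (spreading_code : List (List Int)) : Decidable (Pre_encode_strang bitwise_strang spreading_code) := by unfold Pre_encode_strang; infer_instance
def pvWitness_encode_strang : List (List Int) × List (List Int) :=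
  ([[1, 0, 1, 1, 0, 0, 1, 0]], [[1, -1]])
def Spec_encode_strang (bitwise_strang : List (List Int)) (spreading_code : List (List Int)) (out : List Int) : Prop := out = encode_strang_alt bitwise_strang spreading_code
instance (bitwise_strang : List (List Int)) (spreading_code : List (List Int)) (out : List Int) : Decidable (Spec_encode_strang bitwise_strang spreading_code out) := by unfold Spec_encode_strang; infer_instance

-- ===== CLAIM (what is proved, stated in full; the proofs are below) =====
def Claim_equal_encode_strang : Prop := ∀ (bitwise_strang : List (List Int)) (spreading_code : List (List Int)), Dom_encode_strang bitwise_strang spreading_code → Pre_encode_strang bitwise_strang spreading_code → Spec_encode_strang bitwise_strang spreading_code (encode_strang bitwise_strang spreading_code)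

-- ===== LEMMAS AND PROOFS =====

theorem pv_flat_getD (ch c : List Int) :
    ∀ i : Nat, i < ch.length * c.length →
    (ch.flatMap (fun bit => c.map (fun ce => (2*bit-1)*ce))).getD i 0
      = (2 * ch.getD (i / c.length) 0 - 1) * c.getD (i % c.length) 0 := by
  induction ch with
  | nil => intro i h; simp at h
  | cons b ch ih =>
    intro i h
    have hc : 0 < c.length := by
      rcases Nat.eq_zero_or_pos c.length with h0 | h0
      · simp [h0] at h
      · exact h0
    simp only [List.flatMap_cons]
    by_cases hi : i < c.length
    · have hdiv : i / c.length = 0 := Nat.div_eq_of_lt hi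
      have hmod : i % c.length = i := Nat.mod_eq_of_lt hi
      rw [hdiv, hmod]
      rw [List.getD_eq_getElem?_getD,
        List.getElem?_append_left (by simpa using hi : i < (c.map (fun ce => (2*b-1)*ce)).length),
        List.getElem?_map, List.getElem?_eq_getElem hi]
      simp [List.getElem?_eq_getElem hi, List.getD_eq_getElem?_getD]
    · rw [not_lt] at hi
      have hlen : (c.map (fun ce => (2*b-1)*ce)).length = c.length := by simp
      have key : (c.map (fun ce => (2*b-1)*ce) ++
          ch.flatMap (fun bit => c.map (fun ce => (2*bit-1)*ce))).getD i 0
          = (ch.flatMap (fun bit => c.map (fun ce => (2*bit-1)*ce))).getD (i - c.length) 0 := by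
        simp [List.getD_eq_getElem?_getD, List.getElem?_append_right (hlen ▸ hi : (c.map (fun ce => (2*b-1)*ce)).length ≤ i), hlen]
      rw [key]
      have hb : i - c.length < ch.length * c.length := by
        have h2 : i < ch.length * c.length + c.length := by
          have : (b :: ch).length * c.length = ch.length * c.length + c.length := by
            simp [Nat.succ_mul]
          omega
        omega
      rw [ih (i - c.length) hb]
      have heq : i = (i - c.length) + c.length := by omega
      have hdiv : i / c.length = (i - c.length) / c.length + 1 := by
        conv_lhs => rw [heq]
        rw [Nat.add_div_right _ hc]
      have hmod : i % c.length = (i - c.length) % c.length := by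
        conv_lhs => rw [heq]
        rw [Nat.add_mod_right]
      rw [hdiv, hmod]
      simp [List.getD_eq_getElem?_getD]

theorem pv_fold_map (g : List Int × List Int → List Int) :
    ∀ (ps : List (List Int × List Int)) (N : Nat) (f : Nat → Int),
    ps.foldl (fun encoding p =>
        (List.range encoding.length).map (fun i => encoding.getD i 0 + (g p).getD i 0))
      ((List.range N).map f)
      = (List.range N).map (fun i => f i + (ps.map (fun p => (g p).getD i 0)).sum) := by
  intro ps
  induction ps with
  | nil => intro N f; simp
  | cons p ps ih =>
    intro N f
    rw [List.foldl_cons]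
    have hstep : (List.range ((List.range N).map f).length).map
        (fun i => ((List.range N).map f).getD i 0 + (g p).getD i 0)
        = (List.range N).map (fun i => (f i + (g p).getD i 0)) := by
      rw [List.length_map, List.length_range]
      refine List.map_congr_left ?_
      intro i hi
      rw [List.mem_range] at hi
      rw [List.getD_eq_getElem?_getD, List.getElem?_map, List.getElem?_range hi]
      simp
    rw [hstep, ih N (fun i => f i + (g p).getD i 0)]
    refine List.map_congr_left ?_
    intro i _
    simp [add_assoc]

-- ===== VERDICT (by name: the statement is the Claim_ definition above) =====
theorem encode_strang_spec : Claim_equal_encode_strang := by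
  intro bs sc _ hpre
  unfold Spec_encode_strang
  obtain ⟨-, hlen⟩ := hpre
  unfold encode_strang encode_strang_alt
  simp only [PySem.List.foldl_append_eq_flatMap, List.nil_append]
  have hrep : (List.replicate ((sc.headD []).length * 8) (0:Int))
      = (List.range ((sc.headD []).length * 8)).map (fun _ => 0) := by
    simp [List.map_const']
  rw [hrep, pv_fold_map (fun p => p.1.flatMap (fun bit => p.2.map (fun ce => (2*bit-1)*ce)))]
  rw [Nat.mul_comm 8 (sc.headD []).length]
  refine List.map_congr_left ?_
  intro i hi
  rw [List.mem_range] at hi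
  rw [PySem.List.foldl_add]
  simp only [zero_add]
  congr 1
  refine List.map_congr_left ?_
  intro p hp
  exact pv_flat_getD p.1 p.2 i (lt_of_lt_of_le (by omega) (Nat.mul_comm _ _ ▸ hlen p hp))
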